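-- pv_equiv track=rewrite | github.com/federissoo/KAPRA-TimeSeries-Anonymization | k-anon.py | findK2
-- ===== SOURCE A (Python) =====
-- def findK2(dataset, QI):
--     groups = {}
--     for d in dataset:
--         key = []
--         for qi in QI:
--             key.append(str(d[qi]))
--         key = "-".join(key)
--         if key not in groups:
--             groups[key] = []
--         groups[key].append(d)
--     return min(len(groups[group]) for group in groups)
-- ===== SOURCE B (Python) =====
-- def findK2(dataset, QI):
--     # Sort the per-record keys; equal keys become contiguous runs, whose
--     # lengths are the group sizes.  min() raises on an empty dataset like A.
--     keys = sorted("-".join(str(d[qi]) for qi in QI) for d in dataset)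
--     n = len(keys)
--     runs = []
--     i = 0
--     while i < n:
--         j = i + 1
--         while j < n and keys[j] == keys[i]:
--             j += 1
--         runs.append(j - i)
--         i = j
--     return min(runs)
-- ===== Notes on version B (the rewrite author's own statement) =====
-- stated objective: alternative
-- what changed: Replaces A's grouping dict of record lists by sorting the per-record key list and scanning runs of equal consecutive keys, taking the minimum run length.
import Mathlib
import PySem

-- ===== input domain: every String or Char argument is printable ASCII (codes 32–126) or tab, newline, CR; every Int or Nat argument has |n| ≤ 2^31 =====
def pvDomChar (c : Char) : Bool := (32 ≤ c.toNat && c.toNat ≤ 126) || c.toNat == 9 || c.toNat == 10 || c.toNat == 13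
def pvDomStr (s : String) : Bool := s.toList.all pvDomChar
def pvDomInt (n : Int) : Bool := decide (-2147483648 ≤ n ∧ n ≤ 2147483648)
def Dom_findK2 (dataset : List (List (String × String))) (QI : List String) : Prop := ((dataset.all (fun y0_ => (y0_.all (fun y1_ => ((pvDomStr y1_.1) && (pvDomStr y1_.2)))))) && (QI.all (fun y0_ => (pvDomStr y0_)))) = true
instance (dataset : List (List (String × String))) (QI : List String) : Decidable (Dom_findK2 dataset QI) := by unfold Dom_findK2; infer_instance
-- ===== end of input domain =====

-- B replaces A's grouping dict by sorting the key list and scanning runs of equal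
-- consecutive keys (alternative decomposition; not claimed faster).

-- shared key builder: "-".join(str(d[qi]) for qi in QI) — both Pythons build this
-- identical expression; str() on a string is the identity; the .getD "" default is
-- unreachable inside Pre_ (every qi present; KeyError inputs are excluded by Pre_).
def pvKey (d : List (String × String)) (QI : List String) : String :=
  PySem.Str.join "-" (QI.map (fun qi => ((PySem.Dict.mk d).get? qi).getD ""))

-- ===== PORT A =====
-- the loop body: if key not in groups: groups[key] = [] ; groups[key].append(d)
-- (append = modify at a key that is now present; the [] default is never used for lookup)
def pvStepA (QI : List String) (g : PySem.Dict String (List (List (String × String))))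
    (d : List (String × String)) : PySem.Dict String (List (List (String × String))) :=
  let key := pvKey d QI
  let g' := if g.contains key then g else g.insert key []
  g'.modify key [] (fun l => l ++ [d])

def findK2 (dataset : List (List (String × String))) (QI : List String) : Int :=
  let groups := dataset.foldl (pvStepA QI) PySem.Dict.empty
  -- min(len(groups[group]) for group in groups); min() of an empty dict raises → excluded by Pre_
  ((PySem.List.min? (groups.keys.map (fun k => ((groups.getD k []).length : Int))) (fun x => x)).getD 0)

-- ===== PORT B =====
-- Source B's outer while over i with the inner while advancing j past the equal keys:
-- each outer iteration appends the run length j - i = 1 + m and continues at i = j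
-- (the suffix keys[j:]); min() of the empty runs list raises → excluded by Pre_.
def pvRuns : List String → List Int
  | [] => []
  | k :: t =>
    let m := (t.takeWhile (fun x => x == k)).length
    (1 + (m : Int)) :: pvRuns (t.drop m)
termination_by l => l.length
decreasing_by simp

def findK2_alt (dataset : List (List (String × String))) (QI : List String) : Int :=
  let keys := PySem.List.sorted (dataset.map (fun d => pvKey d QI)) (fun x => x) false
  ((PySem.List.min? (pvRuns keys) (fun x => x)).getD 0)

-- ===== PRECONDITION & SPEC =====
-- Pre_ excludes exactly where A raises: an empty dataset (ValueError from min() of an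
-- empty sequence) and a record missing some qi of QI (KeyError); B raises there too.
def Pre_findK2 (dataset : List (List (String × String))) (QI : List String) : Prop :=
  dataset ≠ [] ∧ ∀ d ∈ dataset, ∀ qi ∈ QI, (PySem.Dict.mk d).contains qi = true
instance (dataset : List (List (String × String))) (QI : List String) : Decidable (Pre_findK2 dataset QI) := by unfold Pre_findK2; infer_instance

def pvWitness_findK2 : (List (List (String × String))) × List String :=
  ([[("a", "1"), ("b", "2")], [("a", "1"), ("b", "3")]], ["a", "b"])

def Spec_findK2 (dataset : List (List (String × String))) (QI : List String) (out : Int) : Prop := out = findK2_alt dataset QI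
instance (dataset : List (List (String × String))) (QI : List String) (out : Int) : Decidable (Spec_findK2 dataset QI out) := by unfold Spec_findK2; infer_instance

-- ===== CLAIM (what is proved, stated in full; the proofs are below) =====
def Claim_equal_findK2 : Prop := ∀ (dataset : List (List (String × String))) (QI : List String), Dom_findK2 dataset QI → Pre_findK2 dataset QI → Spec_findK2 dataset QI (findK2 dataset QI)

-- ===== LEMMAS AND PROOFS =====

-- ----- A side: the groups dict characterised -----

lemma stepA_getD (QI : List String) (g : PySem.Dict String (List (List (String × String))))
    (d : List (String × String)) (c : String) :
    (pvStepA QI g d).getD c [] =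
      if pvKey d QI = c then g.getD c [] ++ [d] else g.getD c [] := by
  dsimp only [pvStepA]
  set key := pvKey d QI with hk
  by_cases hc : g.contains key
  · simp only [hc, if_true, PySem.Dict.getD_modify]
    by_cases he : c = key
    · subst he; simp
    · simp [he, Ne.symm he]
  · have hc' : g.contains key = false := by simpa using hc
    rw [if_neg hc, PySem.Dict.getD_modify]
    by_cases he : c = key
    · subst he
      simp [PySem.Dict.getD_of_not_contains g [] hc']
    · simp [he, Ne.symm he, PySem.Dict.getD_insert]

lemma stepA_keys (QI : List String) (g : PySem.Dict String (List (List (String × String))))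
    (d : List (String × String)) :
    (pvStepA QI g d).keys = PySem.Set.add g.keys (pvKey d QI) := by
  dsimp only [pvStepA]
  set key := pvKey d QI with hk
  by_cases hc : g.contains key
  · rw [if_pos hc, PySem.Dict.keys_modify, PySem.Dict.keys_insert_of_contains _ _ hc]
    have hmem : key ∈ g.keys := (PySem.Dict.contains_iff_mem_keys g key).mp hc
    simp [PySem.Set.add, hmem]
  · have hc' : g.contains key = false := by simpa using hc
    rw [if_neg hc, PySem.Dict.keys_modify,
      PySem.Dict.keys_insert_of_contains _ _ (PySem.Dict.contains_insert_self g key []),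
      PySem.Dict.keys_insert_of_not_contains g [] hc']
    have hmem : key ∉ g.keys := fun hmem => hc ((PySem.Dict.contains_iff_mem_keys g key).mpr hmem)
    simp [PySem.Set.add, hmem]

lemma foldA_getD (QI : List String) (l : List (List (String × String)))
    (g : PySem.Dict String (List (List (String × String)))) (c : String) :
    (l.foldl (pvStepA QI) g).getD c [] =
      g.getD c [] ++ l.filter (fun d => pvKey d QI == c) := by
  induction l generalizing g with
  | nil => simp
  | cons d t ih =>
    rw [List.foldl_cons, ih, stepA_getD]
    by_cases he : pvKey d QI = c
    · simp [he]
    · simp [he]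

lemma foldA_keys (QI : List String) (l : List (List (String × String)))
    (g : PySem.Dict String (List (List (String × String)))) :
    (l.foldl (pvStepA QI) g).keys = (l.map (fun d => pvKey d QI)).foldl PySem.Set.add g.keys := by
  induction l generalizing g with
  | nil => rfl
  | cons d t ih => rw [List.foldl_cons, ih, stepA_keys, List.map_cons, List.foldl_cons]

lemma findK2_eq (dataset : List (List (String × String))) (QI : List String) :
    findK2 dataset QI =
      ((PySem.List.min?
        ((PySem.Set.ofList (dataset.map (fun d => pvKey d QI))).map
          (fun c => ((dataset.map (fun d => pvKey d QI)).count c : Int)))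
        (fun x => x)).getD 0) := by
  dsimp only [findK2]
  rw [foldA_keys, PySem.Dict.keys_empty, ← PySem.Set.ofList_eq_foldl]
  congr 2
  apply List.map_congr_left
  intro c hc
  rw [foldA_getD, PySem.Dict.getD_empty]
  simp [List.count, List.countP_eq_length_filter, List.filter_map, Function.comp_def]

-- ----- B side: runs of a sorted list are the per-distinct-key counts -----

lemma foldl_add_keep (w : List String) (acc : PySem.Set String)
    (h : ∀ x ∈ w, x ∈ acc) : w.foldl PySem.Set.add acc = acc := by
  induction w with
  | nil => rfl
  | cons x t ih =>
    rw [List.foldl_cons]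
    have hx : PySem.Set.add acc x = acc := by
      simp [PySem.Set.add, h x (by simp)]
    rw [hx]
    exact ih (fun y hy => h y (by simp [hy]))

lemma foldl_add_cons (r : List String) (a : String) (acc : List String) (h : a ∉ r) :
    r.foldl PySem.Set.add (a :: acc) = a :: r.foldl PySem.Set.add acc := by
  induction r generalizing acc with
  | nil => rfl
  | cons x t ih =>
    have hxa : x ≠ a := fun he => h (by simp [he])
    rw [List.foldl_cons, List.foldl_cons]
    have hadd : PySem.Set.add (a :: acc) x = a :: PySem.Set.add acc x := by
      by_cases hm : x ∈ acc <;> simp [PySem.Set.add, PySem.Set.contains, hxa, hm]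
    rw [hadd]
    exact ih _ (fun hm => h (by simp [hm]))

lemma dropWhile_head_false (p : String → Bool) (t : List String) (a : String) (r' : List String)
    (h : t.dropWhile p = a :: r') : p a = false := by
  have := List.head?_dropWhile_not p t
  rw [h] at this; simpa using this

lemma pvRuns_eq_aux (n : Nat) : ∀ (s : List String), s.length ≤ n → s.Pairwise (· ≤ ·) →
    pvRuns s = (PySem.Set.ofList s).map (fun k => (s.count k : Int)) := by
  induction n with
  | zero =>
    intro s hn _
    rw [List.length_eq_zero_iff.mp (Nat.le_zero.mp hn)]
    simp [pvRuns]
  | succ n ihn =>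
    intro s hn hs
    cases s with
    | nil => simp [pvRuns]
    | cons k t =>
    rw [List.pairwise_cons] at hs
    obtain ⟨h1, h2⟩ := hs
    set w := t.takeWhile (fun x => x == k) with hwdef
    set r := t.dropWhile (fun x => x == k) with hrdef
    set m := w.length with hmdef
    have ht : t = w ++ r := (List.takeWhile_append_dropWhile).symm
    have hdrop : t.drop m = r := by
      rw [ht, hmdef]; simpa using List.drop_left (l₁ := w) (l₂ := r)
    have hw : ∀ x ∈ w, x = k := by
      intro x hx
      have := List.mem_takeWhile_imp hx
      simpa using this
    have hrp : r.Pairwise (· ≤ ·) := by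
      rw [ht] at h2; exact h2.sublist (List.sublist_append_right w r)
    have hkr : k ∉ r := by
      cases hr : r with
      | nil => simp
      | cons a r' =>
        have hpa : (a == k) = false := dropWhile_head_false _ t a r' (hrdef ▸ hr)
        have hka : k ≠ a := fun he => by simp [he.symm] at hpa
        have hle : k ≤ a := h1 a (by rw [ht, hr]; simp)
        have hlt : k < a := lt_of_le_of_ne hle hka
        intro hm
        rcases List.mem_cons.mp hm with he | hm'
        · exact hka he.symm.symm
        · have : a ≤ k := by
            rw [ht, hr] at h2
            exact (List.pairwise_cons.mp (List.pairwise_append.mp h2).2.1).1 k hm'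
          exact absurd (lt_of_lt_of_le hlt this) (lt_irrefl k)
    have hrlen : r.length ≤ n := by
      have : t.length ≤ n := by simpa using hn
      have hr2 : r.length ≤ t.length := by rw [ht]; simp
      omega
    have hcntk : ((k :: t).count k : Int) = 1 + (m : Int) := by
      rw [List.count_cons_self, ht, List.count_append]
      have hwc : w.count k = w.length := List.count_eq_length.mpr (fun b hb => (hw b hb).symm)
      have hrc : r.count k = 0 := List.count_eq_zero.mpr hkr
      rw [hwc, hrc, hmdef]
      push_cast
      ring
    have hofl : PySem.Set.ofList (k :: t) = k :: PySem.Set.ofList r := by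
      rw [PySem.Set.ofList_eq_foldl, List.foldl_cons]
      have h0 : PySem.Set.add [] k = [k] := by simp [PySem.Set.add, PySem.Set.contains]
      rw [h0, ht, List.foldl_append]
      rw [foldl_add_keep w [k] (fun x hx => by simp [hw x hx])]
      rw [foldl_add_cons r k [] hkr, ← PySem.Set.ofList_eq_foldl]
    rw [pvRuns, hofl, List.map_cons]
    rw [show (t.takeWhile (fun x => x == k)).length = m from rfl, hdrop]
    rw [← hcntk]
    congr 1
    rw [ihn r hrlen hrp]
    apply List.map_congr_left
    intro j hj
    have hjr : j ∈ r := (PySem.Set.mem_ofList r j).mp hj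
    have hjk : j ≠ k := fun he => hkr (he ▸ hjr)
    have hcnt : (k :: t).count j = r.count j := by
      have hwj : w.count j = 0 := List.count_eq_zero.mpr (fun hm => hjk (hw j hm))
      simp [Ne.symm hjk, ht, List.count_append, hwj]
    rw [hcnt]

lemma pvRuns_eq (s : List String) (hs : s.Pairwise (· ≤ ·)) :
    pvRuns s = (PySem.Set.ofList s).map (fun k => (s.count k : Int)) :=
  pvRuns_eq_aux s.length s le_rfl hs

-- ----- min of a list of ints (no key) only depends on the multiset of its elements -----

lemma minD_perm (l1 l2 : List Int) (h : l1.Perm l2) :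
    (PySem.List.min? l1 (fun x => x)).getD 0 = (PySem.List.min? l2 (fun x => x)).getD 0 := by
  match h1 : PySem.List.min? l1 (fun x => x), h2 : PySem.List.min? l2 (fun x => x) with
  | none, none => rfl
  | some m1, none =>
    rw [PySem.List.min?_eq_none_iff] at h2
    subst h2
    rw [List.perm_nil] at h; subst h; simp [PySem.List.min?] at h1
  | none, some m2 =>
    rw [PySem.List.min?_eq_none_iff] at h1
    subst h1
    rw [List.nil_perm] at h; subst h; simp [PySem.List.min?] at h2
  | some m1, some m2 =>
    have hm1 := PySem.List.min?_mem h1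
    have hm2 := PySem.List.min?_mem h2
    have h12 := PySem.List.min?_isMin h2 m1 (h.mem_iff.mp hm1)
    have h21 := PySem.List.min?_isMin h1 m2 (h.symm.mem_iff.mp hm2)
    simp [le_antisymm h21 h12]

lemma findK2_agree (dataset : List (List (String × String))) (QI : List String) :
    findK2 dataset QI = findK2_alt dataset QI := by
  rw [findK2_eq]
  dsimp only [findK2_alt]
  set K := dataset.map (fun d => pvKey d QI) with hK
  set S := PySem.List.sorted K (fun x => x) false with hS
  have hsp : S.Perm K := PySem.List.sorted_perm K (fun x => x) false
  have hpw : S.Pairwise (· ≤ ·) := by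
    simpa using PySem.List.sorted_pairwise K (fun x => x)
  rw [pvRuns_eq S hpw]
  have hstep : (PySem.Set.ofList S).map (fun c => (S.count c : Int)) =
      (PySem.Set.ofList S).map (fun c => (K.count c : Int)) := by
    apply List.map_congr_left
    intro c _
    rw [hsp.count_eq]
  rw [hstep]
  have hperm : (PySem.Set.ofList S).Perm (PySem.Set.ofList K) := by
    rw [List.perm_ext_iff_of_nodup (PySem.Set.nodup_ofList S) (PySem.Set.nodup_ofList K)]
    intro a
    rw [PySem.Set.mem_ofList, PySem.Set.mem_ofList, hsp.mem_iff]
  exact minD_perm _ _ (hperm.map _).symm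

-- ===== VERDICT (by name: the statement is the Claim_ definition above) =====
theorem findK2_spec : Claim_equal_findK2 := by
  intro dataset QI _ _
  unfold Spec_findK2
  exact findK2_agree dataset QI
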